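-- pv_equiv track=rewrite | github.com/Jamie-Rodriguez/google-foobar | running-with-bunnies/solution.py | solution
-- ===== SOURCE A (Python) =====
-- from copy import deepcopy
-- from itertools import permutations
--
-- def floyd_warshall(graph): # type: (list[list[int]]) -> list[list[int]] | None
--     # The total value/"distance" of taking the shortest path from
--     # distances[source][target]
--     distances = deepcopy(graph)
--     n = len(graph) # number of vertices
--     # For next_node[source][target] = node,
--     # The fastest way from 'source' to 'target' is by taking 'node'
--     next_node = [[None for _ in range(n)] for _ in range(n)]
--
--     # Initialise with just going directly to the target node
--     # If an alternative, shorter path is found, it will be updated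
--     for i in range(n):
--         for j in range(n):
--             if i == j: # Don't initialise the diagonal
--                 next_node[i][j] = None
--             # See above note, it's not clear if we can assume all graphs will
--             # be complete digraphs...
--             # If not, it's not given how a disconnected edge is expressed
--             # either...
--             # I will assume it's by the value Infinity
--             elif graph[i][j] == float('inf'):
--                 next_node[i][j] = -1
--             else:
--                 next_node[i][j] = j
--
--     for k in range(n):
--         for i in range(n):
--             for j in range(n):
--                 if distances[i][j] > distances[i][k] + distances[k][j]:
--                     distances[i][j] = distances[i][k] + distances[k][j]
--                     next_node[i][j] = next_node[i][k]
--             # Negative cycle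
--             if distances[i][i] < 0:
--                 return None
--
--     return distances
--
-- def solution(times, times_limit): # type: (list[list[int]], int) -> list[int]
--     shortest_times = floyd_warshall(times)
--     num_bunnies = len(times) - 2
--     # Just to make the code easier to read
--     start = 0
--     bulkhead = len(times) - 1
--
--     # Negative cycles present - we can rescue all bunnies
--     if not shortest_times:
--         return list(range(num_bunnies))
--
--     '''
--         We must exhaustively test *all permutations* of *all subsets* of
--         bunnies :'(
--         i.e. every single possible bunny path permutation
--         Might be able to do this (a little) more efficiently by using depth-first
--         search to explore all permutations, but stop searching a path further if
--         we already exceed the time limit.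
--         But problem states:
--             > There are at most 5 bunnies...
--         So it's worth it just to do this a simpler yet more inefficient way
--     '''
--     # reverse() so that we can get the largest subset of bunnies first and exit
--     for subset_size in reversed(range(1, num_bunnies + 1)):
--         for bunnies in permutations(range(1, num_bunnies + 1), r=subset_size):
--             time_elapsed = 0
--
--             # for i in range(len(bunnies)):
--             for i, bunny in enumerate(bunnies):
--                 if i == 0: # go from start -> bunny(i)
--                     time_elapsed += shortest_times[start][bunny]
--                 else:
--                     time_elapsed += shortest_times[bunnies[i - 1]][bunny]
--
--             # go from last bunny -> bulkhead
--             time_elapsed += shortest_times[bunnies[-1]][bulkhead]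
--
--             if time_elapsed <= times_limit:
--                 # Bunnies are offset by 1 in the adjacency matrix
--                 return sorted(list(bunny - 1 for bunny in bunnies))
--
--     # If we hit here, there is no solution
--     # None can be saved :(
--     return []
-- ===== SOURCE B (Python) =====
-- def solution(times, times_limit):
--     n = len(times)
--
--     # All-pairs shortest paths: functional Floyd-Warshall, a fresh matrix per
--     # round, negative-cycle check once at the end (diagonal went negative).
--     dist = [row[:] for row in times]
--     for k in range(n):
--         dist = [[min(row[j], row[k] + dist[k][j]) for j in range(n)]
--                 for row in dist]
--
--     if any(dist[i][i] < 0 for i in range(n)):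
--         # Negative cycle: every bunny can be rescued
--         return list(range(n - 2))
--
--     bulkhead = n - 1
--
--     # Depth-first backtracking over bunny orderings (lexicographic, so the
--     # first full ordering found is the first feasible one), accumulating the
--     # elapsed time along the path instead of re-summing per permutation.
--     def search(prev, chosen, remaining, slots, elapsed):
--         if slots == 0:
--             if elapsed + dist[prev][bulkhead] <= times_limit:
--                 return sorted(b - 1 for b in chosen)
--             return None
--         for i, b in enumerate(remaining):
--             found = search(b, chosen + [b], remaining[:i] + remaining[i + 1:],
--                            slots - 1, elapsed + dist[prev][b])
--             if found is not None:
--                 return found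
--         return None
--
--     for size in range(n - 2, 0, -1):
--         found = search(0, [], list(range(1, n - 1)), size, 0)
--         if found is not None:
--             return found
--     return []
-- ===== Notes on version B (the rewrite author's own statement) =====
-- stated objective: simpler
-- what changed: B replaces the in-place Floyd-Warshall with next_node bookkeeping and early-exit diagonal checks by a purely functional Floyd-Warshall (a fresh matrix per round, one negative-diagonal check at the end, no next_node/deepcopy), and replaces the itertools-permutations generate-and-test scan by a recursive backtracking search that enumerates orderings lexicographically while accumulating the elapsed time along the path.
-- outside the precondition, e.g. on solution([[-1, -1, 1], [-2147483647]], 10): A returns [], B raises IndexError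
import Mathlib
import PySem

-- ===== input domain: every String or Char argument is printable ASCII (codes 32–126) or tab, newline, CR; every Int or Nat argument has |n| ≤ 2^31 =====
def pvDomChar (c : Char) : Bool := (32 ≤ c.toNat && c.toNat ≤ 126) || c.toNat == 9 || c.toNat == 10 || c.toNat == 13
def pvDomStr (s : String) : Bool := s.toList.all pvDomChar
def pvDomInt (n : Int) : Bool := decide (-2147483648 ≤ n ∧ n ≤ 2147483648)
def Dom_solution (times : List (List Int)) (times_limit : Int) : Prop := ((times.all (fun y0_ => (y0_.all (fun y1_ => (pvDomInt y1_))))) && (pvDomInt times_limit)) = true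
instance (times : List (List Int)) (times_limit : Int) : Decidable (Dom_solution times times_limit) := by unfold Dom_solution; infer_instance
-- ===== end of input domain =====

-- B replaces the in-place Floyd-Warshall + itertools permutation scan with a
-- functional Floyd-Warshall (fresh matrix per round, one negative-diagonal
-- check at the end, no next_node bookkeeping) and a recursive backtracking
-- search that accumulates the elapsed time along the path; objective: simpler.

-- ===== PORT A =====

-- d[i][j]  (default 0 is never reached under Pre_)
def pvGet2 (d : List (List Int)) (i j : Int) : Int :=
  PySem.List.pyGetD (PySem.List.pyGetD d i []) j 0

-- d[i][j] = v
def pvSet2 (d : List (List Int)) (i j : Int) (v : Int) : List (List Int) :=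
  PySem.List.pySetD d i (PySem.List.pySetD (PySem.List.pyGetD d i []) j v)

-- next_node[i][j]
def pvGetN (nn : List (List (Option Int))) (i j : Int) : Option Int :=
  PySem.List.pyGetD (PySem.List.pyGetD nn i []) j none

-- next_node[i][j] = v
def pvSetN (nn : List (List (Option Int))) (i j : Int) (v : Option Int) : List (List (Option Int)) :=
  PySem.List.pySetD nn i (PySem.List.pySetD (PySem.List.pyGetD nn i []) j v)

def floydWarshall (graph : List (List Int)) : Option (List (List Int)) :=
  let distances := graph.map (fun row => row)    -- deepcopy(graph)
  let n : Int := graph.length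
  -- next_node: the None matrix plus the two init loops assign every entry
  -- exactly once, ported as building each entry directly; an int entry is
  -- never == float('inf'), so that branch is the constant false.
  let next_node : List (List (Option Int)) :=
    (PySem.List.pyRange 0 n).map (fun i =>
      (PySem.List.pyRange 0 n).map (fun j =>
        if i == j then none
        else if false then some (-1)
        else some j))
  let result :=
    (PySem.List.pyRange 0 n).foldl (fun st k =>
      (PySem.List.pyRange 0 n).foldl (fun st i =>
        match st with
        | none => none                           -- 'return None' already taken
        | some dnn =>
          let dnn' := (PySem.List.pyRange 0 n).foldl (fun dnn j =>
              if pvGet2 dnn.1 i j > pvGet2 dnn.1 i k + pvGet2 dnn.1 k j then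
                (pvSet2 dnn.1 i j (pvGet2 dnn.1 i k + pvGet2 dnn.1 k j),
                 pvSetN dnn.2 i j (pvGetN dnn.2 i k))
              else dnn) dnn
          if pvGet2 dnn'.1 i i < 0 then none else some dnn') st) (some (distances, next_node))
  result.map (fun dnn => dnn.1)

def solution (times : List (List Int)) (times_limit : Int) : List Int :=
  let shortest_times := floydWarshall times
  let num_bunnies : Int := (times.length : Int) - 2
  let start : Int := 0
  let bulkhead : Int := (times.length : Int) - 1
  -- 'if not shortest_times' is true for None and for the empty matrix
  match shortest_times with
  | none => PySem.List.pyRange 0 num_bunnies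
  | some st =>
    if st = [] then PySem.List.pyRange 0 num_bunnies
    else
      let res := ((PySem.List.pyRange 1 (num_bunnies + 1)).reverse).foldl (fun res subset_size =>
        if res.isSome then res                   -- 'return' already taken
        else
          (PySem.List.permutations (PySem.List.pyRange 1 (num_bunnies + 1)) subset_size.toNat).foldl
            (fun res bunnies =>
              if res.isSome then res
              else
                let time_elapsed : Int :=
                  (PySem.List.enumerate bunnies).foldl (fun te p =>
                    if p.1 == 0 then te + pvGet2 st start p.2
                    else te + pvGet2 st (PySem.List.pyGetD bunnies (p.1 - 1) 0) p.2) 0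
                let time_elapsed := time_elapsed + pvGet2 st (PySem.List.pyGetD bunnies (-1) 0) bulkhead
                if time_elapsed ≤ times_limit then
                  some (PySem.List.sorted (bunnies.map (fun bunny => bunny - 1)) id false)
                else none) none) none
      res.getD []

-- ===== PORT B =====

mutual
def searchB (dist : List (List Int)) (bulkhead limit : Int) (prev : Int)
    (chosen remaining : List Int) (slots : Nat) (elapsed : Int) : Option (List Int) :=
  match slots with
  | 0 =>
    if elapsed + pvGet2 dist prev bulkhead ≤ limit then
      some (PySem.List.sorted (chosen.map (fun b => b - 1)) id false)
    else none
  | s + 1 => tryB dist bulkhead limit prev chosen remaining s elapsed (PySem.List.enumerate remaining)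
termination_by (slots + 1, 0)

def tryB (dist : List (List Int)) (bulkhead limit : Int) (prev : Int)
    (chosen remaining : List Int) (s : Nat) (elapsed : Int) :
    List (Int × Int) → Option (List Int)
  | [] => none
  | (i, b) :: rest =>
    match searchB dist bulkhead limit b (chosen ++ [b])
        (PySem.List.slice remaining none (some i) ++ PySem.List.slice remaining (some (i + 1)) none)
        s (elapsed + pvGet2 dist prev b) with
    | some found => some found
    | none => tryB dist bulkhead limit prev chosen remaining s elapsed rest
termination_by pairs => (s + 1, pairs.length + 1)
end

def solution_alt (times : List (List Int)) (times_limit : Int) : List Int :=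
  let n : Int := times.length
  let dist0 := times.map (fun row => PySem.List.slice row none none)   -- row[:]
  let dist := (PySem.List.pyRange 0 n).foldl (fun dist k =>
      dist.map (fun row => (PySem.List.pyRange 0 n).map (fun j =>
        min (PySem.List.pyGetD row j 0) (PySem.List.pyGetD row k 0 + pvGet2 dist k j)))) dist0
  if (PySem.List.pyRange 0 n).any (fun i => decide (pvGet2 dist i i < 0)) then
    PySem.List.pyRange 0 (n - 2)
  else
    let bulkhead : Int := n - 1
    let res := (PySem.List.pyRange (n - 2) 0 (-1)).foldl (fun res size =>
      if res.isSome then res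
      else searchB dist bulkhead times_limit 0 [] (PySem.List.pyRange 1 (n - 1)) size.toNat 0) none
    res.getD []

-- ===== PRECONDITION & SPEC =====
-- Pre_ excludes ragged matrices (a row shorter than len(times)): there A
-- raises IndexError, except when an early negative-cycle return fires before
-- the first out-of-range access, where A happens to return and B still raises.
def Pre_solution (times : List (List Int)) (times_limit : Int) : Prop :=
  ∀ row ∈ times, times.length ≤ row.length
instance (times : List (List Int)) (times_limit : Int) : Decidable (Pre_solution times times_limit) := by
  unfold Pre_solution; infer_instance

def pvWitness_solution : List (List Int) × Int :=
  ([[0, 2, 2, 2, -1], [9, 0, 2, 2, -1], [9, 3, 0, 2, -1], [9, 3, 2, 0, -1], [9, 3, 2, 2, 0]], 1)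

def Spec_solution (times : List (List Int)) (times_limit : Int) (out : List Int) : Prop := out = solution_alt times times_limit
instance (times : List (List Int)) (times_limit : Int) (out : List Int) : Decidable (Spec_solution times times_limit out) := by unfold Spec_solution; infer_instance

-- ===== CLAIM (what is proved, stated in full; the proofs are below) =====
def Claim_equal_solution : Prop := ∀ (times : List (List Int)) (times_limit : Int), Dom_solution times times_limit → Pre_solution times times_limit → Spec_solution times times_limit (solution times times_limit)

-- ===== LEMMAS AND PROOFS =====

-- ===== proof-side definitions =====

/-- shape of a distance matrix: `n` rows, each row at least `n` wide -/
def MShape (d : List (List Int)) (n : Nat) : Prop :=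
  d.length = n ∧ ∀ row ∈ d, n ≤ row.length

/-- the mathematical Floyd-Warshall iterates -/
def FW (g : List (List Int)) : Nat → Nat → Nat → Int
  | 0, i, j => pvGet2 g i j
  | k + 1, i, j => min (FW g k i j) (FW g k i k + FW g k k j)

/-- pointwise agreement of a matrix with `f` on `[0,n)²` -/
def Agree (d : List (List Int)) (n : Nat) (f : Nat → Nat → Int) : Prop :=
  ∀ i j : Nat, i < n → j < n → pvGet2 d (i : Int) (j : Int) = f i j

theorem getD_mem_of_lt {α : Type} (l : List α) (i : Nat) (dflt : α) (h : i < l.length) :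
    l.getD i dflt ∈ l := by
  rw [List.getD_eq_getElem l dflt h]; exact List.getElem_mem h

theorem pvSet2_length (d : List (List Int)) (i j : Int) (v : Int) :
    (pvSet2 d i j v).length = d.length := by
  simp [pvSet2, PySem.List.length_pySetD]

theorem pvSet2_shape (d : List (List Int)) (n : Nat) (i j : Nat) (v : Int)
    (hd : MShape d n) (hi : i < n) (hj : j < n) :
    MShape (pvSet2 d (i : Int) (j : Int) v) n := by
  obtain ⟨hl, hr⟩ := hd
  constructor
  · rw [pvSet2_length, hl]
  · intro row hrow
    simp only [pvSet2, PySem.List.pySetD_natCast, PySem.List.pyGetD_natCast] at hrow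
    rcases List.mem_or_eq_of_mem_set hrow with h | h
    · exact hr row h
    · subst h
      rw [List.length_set]
      exact hr _ (getD_mem_of_lt d i [] (by omega))

theorem getD_set_if {α : Type} (l : List α) (i m : Nat) (v : α) (dflt : α) (h : i < l.length) :
    (l.set i v).getD m dflt = if m = i then v else l.getD m dflt := by
  by_cases hmi : m = i
  · subst hmi
    simp [List.getD_eq_getElem?_getD, List.getElem?_set_self h]
  · rw [List.getD_eq_getElem?_getD, List.getElem?_set_ne (by omega : i ≠ m),
        ← List.getD_eq_getElem?_getD, if_neg hmi]

theorem pvGet2_pvSet2 (d : List (List Int)) (n : Nat) (i j r c : Nat) (v : Int)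
    (hd : MShape d n) (hi : i < n) (hj : j < n) :
    pvGet2 (pvSet2 d (i : Int) (j : Int) v) (r : Int) (c : Int) =
      if r = i ∧ c = j then v else pvGet2 d (r : Int) (c : Int) := by
  obtain ⟨hl, hr⟩ := hd
  have hid : i < d.length := by omega
  have hrowlen : j < (d.getD i []).length := by
    have := hr _ (getD_mem_of_lt d i [] hid)
    omega
  simp only [pvGet2, pvSet2, PySem.List.pySetD_natCast, PySem.List.pyGetD_natCast]
  rw [getD_set_if d i r _ [] hid]
  by_cases hri : r = i
  · subst hri
    rw [if_pos rfl, getD_set_if _ j c v 0 hrowlen]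
    by_cases hcj : c = j <;> simp [hcj]
  · simp [hri]

-- ===== A-side: drop the (never-read) next_node component =====

def jstepD (k i : Int) (d : List (List Int)) (j : Int) : List (List Int) :=
  if pvGet2 d i j > pvGet2 d i k + pvGet2 d k j then
    pvSet2 d i j (pvGet2 d i k + pvGet2 d k j) else d

def rowD (n k i : Int) (d : List (List Int)) : List (List Int) :=
  (PySem.List.pyRange 0 n).foldl (jstepD k i) d

def istepD (n k : Int) (od : Option (List (List Int))) (i : Int) : Option (List (List Int)) :=
  od.bind (fun d =>
    let d' := rowD n k i d
    if pvGet2 d' i i < 0 then none else some d')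

def fwD (g : List (List Int)) : Option (List (List Int)) :=
  (PySem.List.pyRange 0 (g.length : Int)).foldl (fun od k =>
    (PySem.List.pyRange 0 (g.length : Int)).foldl (istepD (g.length : Int) k) od) (some g)

theorem projJ (js : List Int) (k i : Int) (dnn : List (List Int) × List (List (Option Int))) :
    (js.foldl (fun (dnn : List (List Int) × List (List (Option Int))) j =>
        if pvGet2 dnn.1 i j > pvGet2 dnn.1 i k + pvGet2 dnn.1 k j then
          (pvSet2 dnn.1 i j (pvGet2 dnn.1 i k + pvGet2 dnn.1 k j),
           pvSetN dnn.2 i j (pvGetN dnn.2 i k))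
        else dnn) dnn).1 = js.foldl (jstepD k i) dnn.1 := by
  induction js generalizing dnn with
  | nil => rfl
  | cons j js ih =>
    simp only [List.foldl_cons]
    rw [ih]
    congr 1
    simp only [jstepD]
    split_ifs <;> rfl

theorem projI (n : Int) (is : List Int) (k : Int)
    (st : Option (List (List Int) × List (List (Option Int)))) :
    (is.foldl (fun st i =>
        match st with
        | none => none
        | some dnn =>
          let dnn' := (PySem.List.pyRange 0 n).foldl (fun (dnn : List (List Int) × List (List (Option Int))) j =>
              if pvGet2 dnn.1 i j > pvGet2 dnn.1 i k + pvGet2 dnn.1 k j then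
                (pvSet2 dnn.1 i j (pvGet2 dnn.1 i k + pvGet2 dnn.1 k j),
                 pvSetN dnn.2 i j (pvGetN dnn.2 i k))
              else dnn) dnn
          if pvGet2 dnn'.1 i i < 0 then none else some dnn') st).map Prod.fst
      = is.foldl (istepD n k) (st.map Prod.fst) := by
  induction is generalizing st with
  | nil => rfl
  | cons i is ih =>
    simp only [List.foldl_cons]
    rw [ih]
    congr 1
    match st with
    | none => rfl
    | some dnn =>
      have hp := projJ (PySem.List.pyRange 0 n) k i dnn
      simp only [istepD, rowD, Option.map_some, Option.bind_some, ← hp]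
      split_ifs <;> rfl

theorem projOuter (n : Int) (ks : List Int)
    (st : Option (List (List Int) × List (List (Option Int)))) :
    (ks.foldl (fun st k =>
      (PySem.List.pyRange 0 n).foldl (fun st i =>
        match st with
        | none => none
        | some dnn =>
          let dnn' := (PySem.List.pyRange 0 n).foldl (fun (dnn : List (List Int) × List (List (Option Int))) j =>
              if pvGet2 dnn.1 i j > pvGet2 dnn.1 i k + pvGet2 dnn.1 k j then
                (pvSet2 dnn.1 i j (pvGet2 dnn.1 i k + pvGet2 dnn.1 k j),
                 pvSetN dnn.2 i j (pvGetN dnn.2 i k))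
              else dnn) dnn
          if pvGet2 dnn'.1 i i < 0 then none else some dnn') st) st).map Prod.fst
    = ks.foldl (fun od k => (PySem.List.pyRange 0 n).foldl (istepD n k) od) (st.map Prod.fst) := by
  induction ks generalizing st with
  | nil => rfl
  | cons k ks ih =>
    simp only [List.foldl_cons]
    rw [ih, projI]

theorem projK (g : List (List Int)) :
    floydWarshall g = fwD g := by
  unfold floydWarshall fwD
  rw [projOuter]
  simp [List.map_id']

-- ===== the in-place j-loop computes the functional row update =====

theorem rowAux (n k i : Nat) (fuel : Nat) (a : Nat) (d m : List (List Int))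
    (hfuel : n - a = fuel)
    (hk : k < n) (hi : i < n) (ha : a ≤ n)
    (hkk : 0 ≤ pvGet2 d (k : Int) (k : Int))
    (hsh : MShape m n)
    (hrow : ∀ c : Nat, c < n → pvGet2 m (i : Int) (c : Int) =
      if c < a then min (pvGet2 d (i : Int) (c : Int)) (pvGet2 d (i : Int) (k : Int) + pvGet2 d (k : Int) (c : Int))
      else pvGet2 d (i : Int) (c : Int))
    (hoth : ∀ r c : Nat, r < n → c < n → r ≠ i → pvGet2 m (r : Int) (c : Int) = pvGet2 d (r : Int) (c : Int)) :
    let m' := (PySem.List.pyRange (a : Int) (n : Int)).foldl (jstepD (k : Int) (i : Int)) m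
    MShape m' n ∧
    (∀ c : Nat, c < n → pvGet2 m' (i : Int) (c : Int) =
      min (pvGet2 d (i : Int) (c : Int)) (pvGet2 d (i : Int) (k : Int) + pvGet2 d (k : Int) (c : Int))) ∧
    (∀ r c : Nat, r < n → c < n → r ≠ i → pvGet2 m' (r : Int) (c : Int) = pvGet2 d (r : Int) (c : Int)) := by
  induction fuel generalizing a m with
  | zero =>
    have hna : a = n := by omega
    subst hna
    rw [PySem.List.pyRange_one_eq_nil (le_refl _)]
    refine ⟨hsh, ?_, hoth⟩
    intro c hc
    have := hrow c hc
    rwa [if_pos hc] at this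
  | succ fuel ih =>
  by_cases hna : a = n
  · subst hna
    rw [PySem.List.pyRange_one_eq_nil (le_refl _)]
    refine ⟨hsh, ?_, hoth⟩
    intro c hc
    have := hrow c hc
    rwa [if_pos hc] at this
  · have halt : a < n := by omega
    rw [PySem.List.pyRange_one_cons (by exact_mod_cast halt)]
    simp only [List.foldl_cons]
    -- the value of m[i][k] right now is d[i][k]
    have hmik : pvGet2 m (i : Int) (k : Int) = pvGet2 d (i : Int) (k : Int) := by
      have := hrow k hk
      split_ifs at this with h
      · rw [this, min_eq_left (by omega)]
      · exact this
    have hmka : pvGet2 m (k : Int) (a : Int) = pvGet2 d (k : Int) (a : Int) := by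
      by_cases hki : k = i
      · subst hki
        have := hrow a halt
        rwa [if_neg (by omega)] at this
      · exact hoth k a hk halt hki
    have hmia : pvGet2 m (i : Int) (a : Int) = pvGet2 d (i : Int) (a : Int) := by
      have := hrow a halt
      rwa [if_neg (by omega)] at this
    have step : ∀ m₂ : List (List Int), m₂ = jstepD (k : Int) (i : Int) m (a : Int) →
        MShape m₂ n ∧
        (∀ c : Nat, c < n → pvGet2 m₂ (i : Int) (c : Int) =
          if c < a + 1 then min (pvGet2 d (i : Int) (c : Int)) (pvGet2 d (i : Int) (k : Int) + pvGet2 d (k : Int) (c : Int))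
          else pvGet2 d (i : Int) (c : Int)) ∧
        (∀ r c : Nat, r < n → c < n → r ≠ i → pvGet2 m₂ (r : Int) (c : Int) = pvGet2 d (r : Int) (c : Int)) := by
      intro m₂ hm₂
      unfold jstepD at hm₂
      rw [hmia, hmik, hmka] at hm₂
      split_ifs at hm₂ with hcond
      · subst hm₂
        refine ⟨pvSet2_shape m n i a _ hsh hi halt, ?_, ?_⟩
        · intro c hc
          rw [pvGet2_pvSet2 m n i a i c _ hsh hi halt]
          by_cases hca : c = a
          · subst hca
            rw [if_pos ⟨rfl, rfl⟩, if_pos (by omega), min_eq_right (by omega)]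
          · rw [if_neg (by simp [hca]), hrow c hc]
            by_cases h1 : c < a
            · rw [if_pos h1, if_pos (by omega)]
            · rw [if_neg h1, if_neg (by omega)]
        · intro r c hr hc hri
          rw [pvGet2_pvSet2 m n i a r c _ hsh hi halt, if_neg (by simp [hri]),
            hoth r c hr hc hri]
      · subst hm₂
        refine ⟨hsh, ?_, hoth⟩
        intro c hc
        rw [hrow c hc]
        by_cases hca : c = a
        · subst hca
          rw [if_neg (by omega), if_pos (by omega), min_eq_left (by omega)]
        · by_cases h1 : c < a
          · rw [if_pos h1, if_pos (by omega)]
          · rw [if_neg h1, if_neg (by omega)]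
    obtain ⟨h1, h2, h3⟩ := step _ rfl
    have hcast : ((a : Int) + 1) = ((a + 1 : Nat) : Int) := by push_cast; ring
    rw [hcast]
    exact ih (a + 1) (jstepD (k : Int) (i : Int) m (a : Int)) (by omega) (by omega) h1 h2 h3

theorem foldl_istepD_none (n k : Int) (l : List Int) :
    l.foldl (istepD n k) none = none := by
  induction l with
  | nil => rfl
  | cons x l ih => simpa [istepD] using ih

theorem roundAux (n k : Nat) (fuel a : Nat) (d m : List (List Int))
    (hfuel : n - a = fuel) (hk : k < n) (ha : a ≤ n)
    (hkk : 0 ≤ pvGet2 d (k : Int) (k : Int))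
    (hsh : MShape m n)
    (hagree : ∀ r c : Nat, r < n → c < n → pvGet2 m (r : Int) (c : Int) =
      if r < a then min (pvGet2 d (r : Int) (c : Int)) (pvGet2 d (r : Int) (k : Int) + pvGet2 d (k : Int) (c : Int))
      else pvGet2 d (r : Int) (c : Int)) :
    ((∃ i : Nat, a ≤ i ∧ i < n ∧
        min (pvGet2 d (i : Int) (i : Int)) (pvGet2 d (i : Int) (k : Int) + pvGet2 d (k : Int) (i : Int)) < 0) →
      (PySem.List.pyRange (a : Int) (n : Int)).foldl (istepD (n : Int) (k : Int)) (some m) = none) ∧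
    ((¬ ∃ i : Nat, a ≤ i ∧ i < n ∧
        min (pvGet2 d (i : Int) (i : Int)) (pvGet2 d (i : Int) (k : Int) + pvGet2 d (k : Int) (i : Int)) < 0) →
      ∃ m', (PySem.List.pyRange (a : Int) (n : Int)).foldl (istepD (n : Int) (k : Int)) (some m) = some m' ∧
        MShape m' n ∧
        ∀ r c : Nat, r < n → c < n → pvGet2 m' (r : Int) (c : Int) =
          min (pvGet2 d (r : Int) (c : Int)) (pvGet2 d (r : Int) (k : Int) + pvGet2 d (k : Int) (c : Int))) := by
  induction fuel generalizing a m with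
  | zero =>
    have hna : a = n := by omega
    subst hna
    rw [PySem.List.pyRange_one_eq_nil (le_refl _)]
    constructor
    · rintro ⟨i, h1, h2, -⟩
      omega
    · intro _
      refine ⟨m, rfl, hsh, ?_⟩
      intro r c hr hc
      have := hagree r c hr hc
      rwa [if_pos hr] at this
  | succ fuel ih =>
    have halt : a < n := by omega
    rw [PySem.List.pyRange_one_cons (by exact_mod_cast halt)]
    simp only [List.foldl_cons]
    -- current value of d-row k diagonal inside m
    have hmkk : pvGet2 m (k : Int) (k : Int) = pvGet2 d (k : Int) (k : Int) := by
      have := hagree k k hk hk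
      split_ifs at this with h
      · rw [this, min_eq_left (by omega)]
      · exact this
    -- apply the row lemma for row a, with the CURRENT matrix as base
    obtain ⟨hsh', hrow', hoth'⟩ := rowAux n k a n 0 m m rfl hk halt (by omega)
      (by rw [hmkk]; exact hkk) hsh
      (by intro c hc; rw [if_neg (by omega)]) (by intro r c _ _ _; rfl)
    simp only [Nat.cast_zero] at hsh' hrow' hoth'
    -- translate the row result into d-terms
    have hrowd : ∀ c : Nat, c < n →
        pvGet2 ((PySem.List.pyRange 0 (n : Int)).foldl (jstepD (k : Int) (a : Int)) m) (a : Int) (c : Int) =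
        min (pvGet2 d (a : Int) (c : Int)) (pvGet2 d (a : Int) (k : Int) + pvGet2 d (k : Int) (c : Int)) := by
      intro c hc
      rw [hrow' c hc]
      have hma : ∀ c' : Nat, c' < n → pvGet2 m (a : Int) (c' : Int) = pvGet2 d (a : Int) (c' : Int) := by
        intro c' hc'
        have := hagree a c' halt hc'
        rwa [if_neg (by omega)] at this
      have hmk : ∀ c' : Nat, c' < n → pvGet2 m (k : Int) (c' : Int) = pvGet2 d (k : Int) (c' : Int) := by
        intro c' hc'
        have := hagree k c' hk hc'
        split_ifs at this with h
        · rw [this, min_eq_left (by omega)]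
        · exact this
      rw [hma c hc, hma k hk, hmk c hc]
    have hothd : ∀ r c : Nat, r < n → c < n → r ≠ a →
        pvGet2 ((PySem.List.pyRange 0 (n : Int)).foldl (jstepD (k : Int) (a : Int)) m) (r : Int) (c : Int) =
        pvGet2 m (r : Int) (c : Int) := fun r c hr hc hra => hoth' r c hr hc hra
    -- the istep at row a
    have histep : istepD (n : Int) (k : Int) (some m) (a : Int) =
        (let m' := rowD (n : Int) (k : Int) (a : Int) m
         if pvGet2 m' (a : Int) (a : Int) < 0 then none else some m') := rfl
    set m1 := (PySem.List.pyRange 0 (n : Int)).foldl (jstepD (k : Int) (a : Int)) m with hm1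
    have hm1d : rowD (n : Int) (k : Int) (a : Int) m = m1 := rfl
    by_cases hbad : min (pvGet2 d (a : Int) (a : Int)) (pvGet2 d (a : Int) (k : Int) + pvGet2 d (k : Int) (a : Int)) < 0
    · -- row a turns the diagonal negative: A returns None here
      have : istepD (n : Int) (k : Int) (some m) (a : Int) = none := by
        rw [histep]
        simp only [hm1d]
        rw [if_pos (by rw [hrowd a halt]; exact hbad)]
      rw [this, foldl_istepD_none]
      constructor
      · intro _; rfl
      · intro hno
        exact absurd ⟨a, le_refl a, halt, hbad⟩ hno
    · -- row a stays non-negative: continue with the updated matrix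
      have : istepD (n : Int) (k : Int) (some m) (a : Int) = some m1 := by
        rw [histep]
        simp only [hm1d]
        rw [if_neg (by rw [hrowd a halt]; exact hbad)]
      rw [this]
      have hcast : ((a : Int) + 1) = ((a + 1 : Nat) : Int) := by push_cast; ring
      rw [hcast]
      have hagree1 : ∀ r c : Nat, r < n → c < n → pvGet2 m1 (r : Int) (c : Int) =
          if r < a + 1 then min (pvGet2 d (r : Int) (c : Int)) (pvGet2 d (r : Int) (k : Int) + pvGet2 d (k : Int) (c : Int))
          else pvGet2 d (r : Int) (c : Int) := by
        intro r c hr hc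
        by_cases hra : r = a
        · subst hra
          rw [hrowd c hc, if_pos (by omega)]
        · rw [hothd r c hr hc hra, hagree r c hr hc]
          by_cases h1 : r < a
          · rw [if_pos h1, if_pos (by omega)]
          · rw [if_neg h1, if_neg (by omega)]
      obtain ⟨ihbad, ihgood⟩ := ih (a + 1) m1 (by omega) (by omega) hsh' hagree1
      constructor
      · rintro ⟨i, h1, h2, h3⟩
        have hia : i ≠ a := by
          intro hia; subst hia; exact hbad h3
        exact ihbad ⟨i, by omega, h2, h3⟩
      · intro hno
        apply ihgood
        rintro ⟨i, h1, h2, h3⟩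
        exact hno ⟨i, by omega, h2, h3⟩

theorem FW_diag_mono (g : List (List Int)) (i : Nat) {k1 k2 : Nat} (h : k1 ≤ k2) :
    FW g k2 i i ≤ FW g k1 i i := by
  induction k2 with
  | zero => simp_all
  | succ k2 ih =>
    rcases Nat.lt_or_ge k1 (k2 + 1) with h1 | h1
    · exact le_trans (min_le_left _ _) (ih (by omega))
    · have : k1 = k2 + 1 := by omega
      subst this; rfl

-- A's run with the first diagonal entry negative: row 0 of round 0 already detects
theorem fwD_round0_neg (g : List (List Int)) (hn : 0 < g.length)
    (hsh : MShape g g.length) (hneg : pvGet2 g 0 0 < 0) :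
    fwD g = none := by
  have hn' : (0 : Int) < (g.length : Int) := by exact_mod_cast hn
  -- row 0, step j = 0 writes g00+g00 into entry (0,0); later steps leave it alone
  have hstep0 : jstepD 0 0 g 0 = pvSet2 g 0 0 (pvGet2 g 0 0 + pvGet2 g 0 0) := by
    unfold jstepD
    rw [if_pos (by omega)]
  have hkeep : ∀ js : List Int, (∀ j ∈ js, 1 ≤ j ∧ j < (g.length : Int)) →
      ∀ m : List (List Int), MShape m g.length →
      pvGet2 (js.foldl (jstepD 0 0) m) 0 0 = pvGet2 m 0 0 ∧ MShape (js.foldl (jstepD 0 0) m) g.length := by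
    intro js
    induction js with
    | nil => intro _ m hm; exact ⟨rfl, hm⟩
    | cons j js ih =>
      intro hmem m hm
      obtain ⟨hj1, hj2⟩ := hmem j (by simp)
      have hjn : j.toNat < g.length := by omega
      have hcast : j = ((j.toNat : Nat) : Int) := by omega
      have hstep : MShape (jstepD 0 0 m j) g.length ∧ pvGet2 (jstepD 0 0 m j) 0 0 = pvGet2 m 0 0 := by
        unfold jstepD
        split_ifs with h
        · constructor
          · rw [hcast]
            have h0 : (0 : Int) = ((0 : Nat) : Int) := rfl
            rw [h0]
            exact pvSet2_shape m g.length 0 j.toNat _ hm hn hjn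
          · have h0 : (0 : Int) = ((0 : Nat) : Int) := rfl
            rw [hcast, h0, pvGet2_pvSet2 m g.length 0 j.toNat 0 0 _ hm hn hjn]
            rw [if_neg (by intro ⟨_, hc⟩; omega)]
        · exact ⟨hm, rfl⟩
      obtain ⟨h1, h2⟩ := hstep
      simp only [List.foldl_cons]
      obtain ⟨ha, hb⟩ := ih (fun j hj => hmem j (by simp [hj])) (jstepD 0 0 m j) h1
      exact ⟨by rw [ha, h2], hb⟩
  -- therefore row 0 of round 0 gives a negative diagonal entry
  have hrow0 : pvGet2 (rowD (g.length : Int) 0 0 g) 0 0 < 0 := by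
    unfold rowD
    rw [PySem.List.pyRange_one_cons hn']
    simp only [zero_add, List.foldl_cons]
    rw [hstep0]
    have hsh0 : MShape (pvSet2 g 0 0 (pvGet2 g 0 0 + pvGet2 g 0 0)) g.length := by
      have h0 : (0 : Int) = ((0 : Nat) : Int) := rfl
      rw [h0]
      exact pvSet2_shape g g.length 0 0 _ hsh hn hn
    obtain ⟨ha, -⟩ := hkeep (PySem.List.pyRange 1 (g.length : Int))
      (fun j hj => (PySem.List.mem_pyRange_one.mp hj)) _ hsh0
    rw [ha]
    have h0 : (0 : Int) = ((0 : Nat) : Int) := rfl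
    rw [h0, pvGet2_pvSet2 g g.length 0 0 0 0 _ hsh hn hn, if_pos ⟨rfl, rfl⟩]
    simp only [Nat.cast_zero]
    omega
  -- hence the first istep returns none, and none is absorbing everywhere
  unfold fwD
  rw [PySem.List.pyRange_one_cons hn']
  simp only [zero_add, List.foldl_cons]
  have h1 : istepD (g.length : Int) 0 (some g) 0 = none := by
    unfold istepD
    simp only [Option.bind_some]
    rw [if_pos hrow0]
  rw [h1, foldl_istepD_none]
  have habs : ∀ (ks : List Int) (bf : Option (List (List Int)) → Int → Option (List (List Int))),
      (∀ k, bf none k = none) → ks.foldl bf none = none := by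
    intro ks bf hbf
    induction ks with
    | nil => rfl
    | cons k ks ih => simp only [List.foldl_cons, hbf]; exact ih
  apply habs
  intro k
  have h2 : istepD (g.length : Int) k none 0 = none := rfl
  rw [h2, foldl_istepD_none]

theorem fwD_char (g : List (List Int)) (hsh : MShape g g.length) :
    (fwD g = none → ∃ i, i < g.length ∧ FW g g.length i i < 0) ∧
    (∀ m, fwD g = some m → MShape m g.length ∧ Agree m g.length (FW g g.length) ∧
      ¬ ∃ i, i < g.length ∧ FW g g.length i i < 0) := by
  set n := g.length with hn
  by_cases hn0 : n = 0
  · constructor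
    · intro h
      unfold fwD at h
      rw [← hn, hn0] at h
      simp [PySem.List.pyRange_one_eq_nil] at h
    · intro m hm
      unfold fwD at hm
      rw [← hn, hn0] at hm
      simp only [Nat.cast_zero, PySem.List.pyRange_one_eq_nil (le_refl 0), List.foldl_nil,
        Option.some.injEq] at hm
      subst hm
      refine ⟨hsh, ?_, ?_⟩
      · intro i j hi hj; omega
      · rintro ⟨i, hi, -⟩; omega
  · have hnpos : 0 < n := by omega
    by_cases hg00 : pvGet2 g 0 0 < 0
    · have hnone := fwD_round0_neg g hnpos hsh hg00
      constructor
      · intro _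
        refine ⟨0, hnpos, ?_⟩
        have hFW0 : FW g 0 0 0 = pvGet2 g 0 0 := by
          show pvGet2 g ((0:Nat) : Int) ((0:Nat) : Int) = _
          simp only [Nat.cast_zero]
        have h1 : FW g 1 0 0 = min (pvGet2 g 0 0) (pvGet2 g 0 0 + pvGet2 g 0 0) := by
          show min (FW g 0 0 0) (FW g 0 0 0 + FW g 0 0 0) = _
          rw [hFW0]
        have h2 := FW_diag_mono g 0 (show 1 ≤ n by omega)
        omega
      · intro m hm
        rw [hnone] at hm
        exact absurd hm (by simp)
    · -- first diagonal entry non-negative: round-by-round induction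
      rw [not_lt] at hg00
      have main : ∀ b : Nat, b ≤ n →
          let Rb := (PySem.List.pyRange 0 (b : Int)).foldl (fun od k =>
            (PySem.List.pyRange 0 (n : Int)).foldl (istepD (n : Int) k) od) (some g)
          (Rb = none → ∃ i, i < n ∧ FW g b i i < 0) ∧
          (∀ m, Rb = some m → MShape m n ∧ Agree m n (FW g b) ∧
            (b = 0 ∨ ∀ i, i < n → 0 ≤ FW g b i i)) := by
        intro b
        induction b with
        | zero =>
          intro _
          constructor
          · intro h
            simp [PySem.List.pyRange_one_eq_nil] at h
          · intro m hm
            simp only [Nat.cast_zero, PySem.List.pyRange_one_eq_nil (le_refl 0), List.foldl_nil,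
              Option.some.injEq] at hm
            subst hm
            refine ⟨hsh, ?_, Or.inl rfl⟩
            intro i j hi hj
            rfl
        | succ b ih =>
          intro hble
          obtain ⟨ihno, ihsome⟩ := ih (by omega)
          have hsplit : (PySem.List.pyRange 0 ((b + 1 : Nat) : Int)) =
              (PySem.List.pyRange 0 (b : Int)) ++ [(b : Int)] := by
            push_cast
            exact PySem.List.pyRange_one_succ_right (by omega)
          rw [hsplit, List.foldl_append, List.foldl_cons, List.foldl_nil]
          rcases hR : (PySem.List.pyRange 0 (b : Int)).foldl (fun od k =>
            (PySem.List.pyRange 0 (n : Int)).foldl (istepD (n : Int) k) od) (some g) with _ | m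
          · -- already none: stays none, diagonal stays negative
            rw [foldl_istepD_none]
            obtain ⟨i, hi, hneg⟩ := ihno hR
            constructor
            · intro _
              refine ⟨i, hi, ?_⟩
              have := FW_diag_mono g i (show b ≤ b + 1 by omega)
              omega
            · intro m hm
              exact absurd hm (by simp)
          · obtain ⟨hmsh, hmagree, hdiag⟩ := ihsome m hR
            have hbn : b < n := by omega
            have hkk : 0 ≤ pvGet2 m (b : Int) (b : Int) := by
              rw [hmagree b b hbn hbn]
              rcases hdiag with h0 | hall
              · subst h0
                show 0 ≤ pvGet2 g ((0:Nat) : Int) ((0:Nat) : Int)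
                simpa using hg00
              · exact hall b hbn
            obtain ⟨rbad, rgood⟩ := roundAux n b n 0 m m (by omega) hbn (by omega) hkk hmsh
              (by intro r c hr hc; rw [if_neg (by omega)])
            simp only [Nat.cast_zero] at rbad rgood
            have hminFW : ∀ i c : Nat, i < n → c < n →
                min (pvGet2 m (i : Int) (c : Int)) (pvGet2 m (i : Int) (b : Int) + pvGet2 m (b : Int) (c : Int))
                  = FW g (b + 1) i c := by
              intro i c hi hc
              show _ = min (FW g b i c) (FW g b i b + FW g b b c)
              rw [hmagree i c hi hc, hmagree i b hi hbn, hmagree b c hbn hc]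
            by_cases hex : ∃ i, i < n ∧ FW g (b + 1) i i < 0
            · obtain ⟨i, hi, hneg⟩ := hex
              have : (PySem.List.pyRange 0 (n : Int)).foldl (istepD (n : Int) (b : Int)) (some m) = none := by
                apply rbad
                exact ⟨i, by omega, hi, by rw [hminFW i i hi hi]; exact hneg⟩
              rw [this]
              exact ⟨fun _ => ⟨i, hi, hneg⟩, fun m' hm' => absurd hm' (by simp)⟩
            · obtain ⟨m', hm', hm'sh, hm'val⟩ := rgood (by
                rintro ⟨i, -, hi, hneg⟩
                exact hex ⟨i, hi, by rw [← hminFW i i hi hi]; exact hneg⟩)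
              rw [hm']
              constructor
              · intro h; exact absurd h (by simp)
              · rintro m'' hm''
                rw [Option.some.injEq] at hm''
                subst hm''
                refine ⟨hm'sh, ?_, Or.inr ?_⟩
                · intro i j hi hj
                  rw [hm'val i j hi hj, hminFW i j hi hj]
                · intro i hi
                  by_contra hneg
                  exact hex ⟨i, hi, by omega⟩
      obtain ⟨hno, hsome⟩ := main n (le_refl n)
      constructor
      · intro h
        exact hno h
      · intro m hm
        obtain ⟨h1, h2, h3⟩ := hsome m hm
        refine ⟨h1, h2, ?_⟩
        rintro ⟨i, hi, hneg⟩
        rcases h3 with h0 | hall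
        · omega
        · exact absurd hneg (by have := hall i hi; omega)

-- ===== B-side: the functional Floyd-Warshall rounds =====

theorem getD_map_in {α β : Type} (l : List α) (f : α → β) (i : Nat) (d1 : β) (d2 : α)
    (h : i < l.length) :
    (l.map f).getD i d1 = f (l.getD i d2) := by
  rw [List.getD_eq_getElem l d2 h, List.getD_eq_getElem _ d1 (by simpa using h),
    List.getElem_map]

def bround (n : Int) (dist : List (List Int)) (k : Int) : List (List Int) :=
  dist.map (fun row => (PySem.List.pyRange 0 n).map (fun j =>
    min (PySem.List.pyGetD row j 0) (PySem.List.pyGetD row k 0 + pvGet2 dist k j)))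

theorem bround_shape (n : Nat) (dist : List (List Int)) (k : Int)
    (hd : dist.length = n) : MShape (bround (n : Int) dist k) n := by
  constructor
  · simp [bround, hd]
  · intro row hrow
    simp only [bround, List.mem_map] at hrow
    obtain ⟨r, -, hr⟩ := hrow
    subst hr
    simp [PySem.List.length_pyRange_one]

theorem bround_get (n : Nat) (dist : List (List Int)) (k : Int) (i j : Nat)
    (hd : dist.length = n) (hi : i < n) (hj : j < n) :
    pvGet2 (bround (n : Int) dist k) (i : Int) (j : Int) =
      min (pvGet2 dist (i : Int) (j : Int)) (pvGet2 dist (i : Int) k + pvGet2 dist k (j : Int)) := by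
  unfold bround pvGet2
  have h1 : PySem.List.pyGetD (dist.map (fun row => (PySem.List.pyRange 0 (n : Int)).map (fun j =>
        min (PySem.List.pyGetD row j 0) (PySem.List.pyGetD row k 0 + PySem.List.pyGetD (PySem.List.pyGetD dist k []) j 0)))) (i : Int) []
      = (PySem.List.pyRange 0 (n : Int)).map (fun j =>
        min (PySem.List.pyGetD (PySem.List.pyGetD dist (i : Int) []) j 0)
          (PySem.List.pyGetD (PySem.List.pyGetD dist (i : Int) []) k 0 + PySem.List.pyGetD (PySem.List.pyGetD dist k []) j 0)) := by
    rw [PySem.List.pyGetD_natCast, PySem.List.pyGetD_natCast,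
      getD_map_in dist _ i [] [] (by omega)]
  rw [h1, PySem.List.pyGetD_map_pyRange_of_nonneg _ (n : Int) (j : Int) 0 (by omega) (by exact_mod_cast hj)]

theorem bfold_char (g : List (List Int)) (hsh : MShape g g.length) (b : Nat) (hb : b ≤ g.length) :
    let Db := (PySem.List.pyRange 0 (b : Int)).foldl (fun dist k =>
      dist.map (fun row => (PySem.List.pyRange 0 (g.length : Int)).map (fun j =>
        min (PySem.List.pyGetD row j 0) (PySem.List.pyGetD row k 0 + pvGet2 dist k j)))) g
    MShape Db g.length ∧ Agree Db g.length (FW g b) := by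
  set n := g.length with hn
  induction b with
  | zero =>
    simp only [Nat.cast_zero, PySem.List.pyRange_one_eq_nil (le_refl 0), List.foldl_nil]
    exact ⟨hsh, fun i j hi hj => rfl⟩
  | succ b ih =>
    obtain ⟨ihsh, ihagree⟩ := ih (by omega)
    have hsplit : (PySem.List.pyRange 0 ((b + 1 : Nat) : Int)) =
        (PySem.List.pyRange 0 (b : Int)) ++ [(b : Int)] := by
      push_cast
      exact PySem.List.pyRange_one_succ_right (by omega)
    rw [hsplit, List.foldl_append, List.foldl_cons, List.foldl_nil]
    set Db := (PySem.List.pyRange 0 (b : Int)).foldl (fun dist k =>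
      dist.map (fun row => (PySem.List.pyRange 0 (n : Int)).map (fun j =>
        min (PySem.List.pyGetD row j 0) (PySem.List.pyGetD row k 0 + pvGet2 dist k j)))) g with hDb
    have hbn : b < n := by omega
    constructor
    · exact bround_shape n Db (b : Int) ihsh.1
    · intro i j hi hj
      rw [show (Db.map (fun row => (PySem.List.pyRange 0 (n : Int)).map (fun j =>
          min (PySem.List.pyGetD row j 0) (PySem.List.pyGetD row (b : Int) 0 + pvGet2 Db (b : Int) j))))
          = bround (n : Int) Db (b : Int) from rfl]
      rw [bround_get n Db (b : Int) i j ihsh.1 hi hj]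
      show _ = min (FW g b i j) (FW g b i b + FW g b b j)
      rw [ihagree i j hi hj, ihagree i b hi hbn, ihagree b j hbn hj]

-- ===== phase 2: the permutation scan vs the backtracking search =====

/-- start -> p's legs -> bulkhead total time -/
def costF (D : List (List Int)) (bh : Int) : Int → List Int → Int
  | prev, [] => pvGet2 D prev bh
  | prev, x :: xs => pvGet2 D prev x + costF D bh x xs

/-- accumulate-first-success, the shape of every early-return for-loop here -/
theorem foldl_firstSome {α β : Type} (l : List α) (g : α → Option β) :
    l.foldl (fun res x => if res.isSome then res else g x) none = l.findSome? g := by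
  have H : ∀ init : Option β, l.foldl (fun res x => if res.isSome then res else g x) init =
      (if init.isSome then init else l.findSome? g) := by
    induction l with
    | nil => intro init; cases init <;> rfl
    | cons x l ih =>
      intro init
      rw [List.foldl_cons, ih]
      cases init with
      | some r => rfl
      | none =>
        rw [List.findSome?_cons]
        cases g x <;> rfl
  exact H none

theorem findSome?_congr_mem {α β : Type} (l : List α) (f g : α → Option β)
    (h : ∀ x ∈ l, f x = g x) : l.findSome? f = l.findSome? g := by
  induction l with
  | nil => rfl
  | cons x l ih =>
    rw [List.findSome?_cons, List.findSome?_cons, h x (by simp),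
      ih (fun y hy => h y (by simp [hy]))]

theorem findSome?_flatMap {α β γ : Type} (l : List α) (g : α → List β) (f : β → Option γ) :
    (l.flatMap g).findSome? f = l.findSome? (fun x => (g x).findSome? f) := by
  induction l with
  | nil => rfl
  | cons x l ih =>
    rw [List.flatMap_cons, List.findSome?_append, List.findSome?_cons, ih]
    cases (g x).findSome? f <;> rfl

-- tryB over an index list
theorem tryB_eq (D : List (List Int)) (bh lim prev : Int) (chosen remaining : List Int)
    (s : Nat) (elapsed : Int) (js : List Nat) (hjs : ∀ j ∈ js, j < remaining.length) :
    tryB D bh lim prev chosen remaining s elapsed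
        (js.map (fun (j : Nat) => ((j : Int), PySem.List.pyGetD remaining (j : Int) 0))) =
      js.findSome? (fun (j : Nat) =>
        searchB D bh lim (PySem.List.pyGetD remaining (j : Int) 0)
          (chosen ++ [PySem.List.pyGetD remaining (j : Int) 0])
          (remaining.eraseIdx j) s
          (elapsed + pvGet2 D prev (PySem.List.pyGetD remaining (j : Int) 0))) := by
  induction js with
  | nil => rw [List.map_nil, tryB]; rfl
  | cons j js ih =>
    have hj := hjs j (by simp)
    rw [List.map_cons, tryB, List.findSome?_cons]
    have herase : PySem.List.slice remaining none (some (j : Int)) ++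
        PySem.List.slice remaining (some ((j : Int) + 1)) none = remaining.eraseIdx j := by
      rw [PySem.List.slice_to_natCast, show ((j : Int) + 1) = ((j + 1 : Nat) : Int) by push_cast; ring,
        PySem.List.slice_from_natCast, List.eraseIdx_eq_take_drop_succ]
    rw [herase]
    cases searchB D bh lim (PySem.List.pyGetD remaining (j : Int) 0)
        (chosen ++ [PySem.List.pyGetD remaining (j : Int) 0])
        (remaining.eraseIdx j) s
        (elapsed + pvGet2 D prev (PySem.List.pyGetD remaining (j : Int) 0)) with
    | some r => rfl
    | none => exact ih (fun j hj => hjs j (by simp [hj]))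

theorem searchB_eq (D : List (List Int)) (bh lim : Int) (s : Nat) :
    ∀ (remaining : List Int) (prev : Int) (chosen : List Int) (elapsed : Int),
    searchB D bh lim prev chosen remaining s elapsed =
      (PySem.List.permutations remaining s).findSome? (fun p =>
        if elapsed + costF D bh prev p ≤ lim then
          some (PySem.List.sorted ((chosen ++ p).map (fun b => b - 1)) id false)
        else none) := by
  induction s with
  | zero =>
    intro remaining prev chosen elapsed
    rw [searchB]
    show _ = List.findSome? _ [[]]
    rw [List.findSome?_cons]
    have hc : costF D bh prev [] = pvGet2 D prev bh := rfl
    rw [hc]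
    by_cases h : elapsed + pvGet2 D prev bh ≤ lim <;> simp [h]
  | succ s ih =>
    intro remaining prev chosen elapsed
    rw [searchB]
    have henum : PySem.List.enumerate remaining =
        (List.range remaining.length).map (fun (j : Nat) => ((j : Int), PySem.List.pyGetD remaining (j : Int) 0)) := by
      rw [PySem.List.enumerate_eq_map_pyRange remaining 0, PySem.List.len_eq,
        PySem.List.pyRange_zero_natCast, List.map_map]
      rfl
    rw [henum, tryB_eq D bh lim prev chosen remaining s elapsed _ (fun j hj => by simpa using hj)]
    rw [PySem.List.permutations]
    rw [findSome?_flatMap]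
    apply findSome?_congr_mem
    intro j hj
    have hjlt : j < remaining.length := by simpa using hj
    have hget : remaining[j]? = some remaining[j] := List.getElem?_eq_getElem hjlt
    have hgetD : PySem.List.pyGetD remaining (j : Int) 0 = remaining[j] :=
      PySem.List.pyGetD_ofNat remaining j 0 hjlt
    rw [hgetD, hget]
    rw [ih (remaining.eraseIdx j) remaining[j] (chosen ++ [remaining[j]])
      (elapsed + pvGet2 D prev remaining[j])]
    show _ = ((PySem.List.permutations (remaining.eraseIdx j) s).map (fun p => remaining[j] :: p)).findSome? _
    rw [List.findSome?_map]
    apply findSome?_congr_mem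
    intro p hp
    show (if elapsed + pvGet2 D prev remaining[j] + costF D bh remaining[j] p ≤ lim then
        some (PySem.List.sorted (((chosen ++ [remaining[j]]) ++ p).map (fun b => b - 1)) id false) else none) = _
    have h1 : elapsed + pvGet2 D prev remaining[j] + costF D bh remaining[j] p =
        elapsed + costF D bh prev (remaining[j] :: p) := by
      show _ = elapsed + (pvGet2 D prev remaining[j] + costF D bh remaining[j] p)
      ring
    have h2 : (chosen ++ [remaining[j]]) ++ p = chosen ++ remaining[j] :: p := by simp
    rw [h1, h2]
    rfl

-- ===== A's per-permutation elapsed-time computation =====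

def costChain (D : List (List Int)) : Int → List Int → Int
  | _, [] => 0
  | prev, x :: xs => pvGet2 D prev x + costChain D x xs

theorem costAux (D : List (List Int)) (full : List Int) (ys : List Int) :
    ∀ (pre : List Int) (prev te : Int), full = pre ++ prev :: ys →
    (PySem.List.enumerate ys ((pre.length : Int) + 1)).foldl
      (fun te p => if p.1 == 0 then te + pvGet2 D 0 p.2
        else te + pvGet2 D (PySem.List.pyGetD full (p.1 - 1) 0) p.2) te
      = te + costChain D prev ys := by
  induction ys with
  | nil =>
    intro pre prev te h
    rw [PySem.List.enumerate_nil, List.foldl_nil]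
    show te = te + 0
    rw [add_zero]
  | cons y ys ih =>
    intro pre prev te h
    rw [PySem.List.enumerate_cons, List.foldl_cons]
    have hne : (((pre.length : Int) + 1) == 0) = false := by
      simp only [beq_eq_false_iff_ne, ne_eq]
      omega
    rw [hne]
    simp only [Bool.false_eq_true, if_false]
    have hidx : (pre.length : Int) + 1 - 1 = ((pre.length : Nat) : Int) := by ring
    have hprev : PySem.List.pyGetD full ((pre.length : Int) + 1 - 1) 0 = prev := by
      rw [hidx, PySem.List.pyGetD_natCast, h, List.getD_eq_getElem?_getD,
        List.getElem?_append_right (le_refl pre.length), Nat.sub_self]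
      rfl
    rw [hprev]
    have hre : (pre.length : Int) + 1 + 1 = (((pre ++ [prev]).length : Nat) : Int) + 1 := by
      push_cast [List.length_append, List.length_singleton]
      ring
    rw [hre, ih (pre ++ [prev]) y (te + pvGet2 D prev y) (by rw [h]; simp)]
    show _ = te + (pvGet2 D prev y + costChain D y ys)
    ring

theorem chainLast (D : List (List Int)) (bh : Int) (ys : List Int) :
    ∀ prev : Int, costChain D prev ys + pvGet2 D ((prev :: ys).getLast (by simp)) bh
      = costF D bh prev ys := by
  induction ys with
  | nil =>
    intro prev
    show 0 + pvGet2 D prev bh = pvGet2 D prev bh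
    rw [zero_add]
  | cons y ys ih =>
    intro prev
    show pvGet2 D prev y + costChain D y ys + pvGet2 D _ bh = pvGet2 D prev y + costF D bh y ys
    rw [List.getLast_cons (by simp : (y :: ys) ≠ []), add_assoc, ih y]

theorem costA_eq (D : List (List Int)) (bh : Int) (x : Int) (xs : List Int) :
    ((PySem.List.enumerate (x :: xs)).foldl (fun te p =>
        if p.1 == 0 then te + pvGet2 D 0 p.2
        else te + pvGet2 D (PySem.List.pyGetD (x :: xs) (p.1 - 1) 0) p.2) 0)
      + pvGet2 D (PySem.List.pyGetD (x :: xs) (-1) 0) bh = costF D bh 0 (x :: xs) := by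
  rw [PySem.List.enumerate_cons, List.foldl_cons]
  have h0 : ((0 : Int) == 0) = true := by simp
  rw [h0]
  simp only [if_true]
  have h1 : (0 : Int) + 1 = (((([] : List Int)).length : Nat) : Int) + 1 := by simp
  rw [zero_add, h1, costAux D (x :: xs) xs [] x (pvGet2 D 0 x) (by simp)]
  rw [PySem.List.pyGetD_neg_one (x :: xs) 0 (List.cons_ne_nil x xs)]
  show pvGet2 D 0 x + costChain D x xs + pvGet2 D ((x :: xs).getLast (List.cons_ne_nil x xs)) bh
    = pvGet2 D 0 x + costF D bh x xs
  rw [add_assoc, chainLast D bh xs x]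

theorem costF_congr (D1 D2 : List (List Int)) (n : Nat) (bh : Int)
    (hag : ∀ i j : Nat, i < n → j < n → pvGet2 D1 (i : Int) (j : Int) = pvGet2 D2 (i : Int) (j : Int))
    (hbh : bh = (n : Int) - 1) (hn : 1 ≤ n) (p : List Int) :
    ∀ prev : Int, 0 ≤ prev → prev < (n : Int) → (∀ x ∈ p, 0 ≤ x ∧ x < (n : Int)) →
    costF D1 bh prev p = costF D2 bh prev p := by
  induction p with
  | nil =>
    intro prev h0 h1 _
    show pvGet2 D1 prev bh = pvGet2 D2 prev bh
    have e1 : prev = ((prev.toNat : Nat) : Int) := by omega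
    have e2 : bh = (((n - 1 : Nat) : Nat) : Int) := by omega
    rw [e1, e2]
    exact hag prev.toNat (n - 1) (by omega) (by omega)
  | cons x xs ih =>
    intro prev h0 h1 hall
    obtain ⟨hx0, hx1⟩ := hall x (by simp)
    show pvGet2 D1 prev x + costF D1 bh x xs = pvGet2 D2 prev x + costF D2 bh x xs
    have e1 : prev = ((prev.toNat : Nat) : Int) := by omega
    have e2 : x = ((x.toNat : Nat) : Int) := by omega
    rw [ih x hx0 hx1 (fun y hy => hall y (by simp [hy]))]
    congr 1
    rw [e1, e2]
    exact hag prev.toNat x.toNat (by omega) (by omega)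

-- ===== assembly =====

theorem main_eq (times : List (List Int)) (tl : Int)
    (hpre : ∀ row ∈ times, times.length ≤ row.length) :
    solution times tl = solution_alt times tl := by
  have hsh : MShape times times.length := ⟨rfl, hpre⟩
  obtain ⟨hnone, hsome⟩ := fwD_char times hsh
  obtain ⟨hBsh, hBagree⟩ := bfold_char times hsh times.length (le_refl _)
  simp only [solution, solution_alt]
  rw [projK]
  have hdist0 : times.map (fun row => PySem.List.slice row none none) = times := by
    simp [PySem.List.slice_none_none]
  rw [hdist0]
  set n := times.length with hn
  set Db := (PySem.List.pyRange 0 (n : Int)).foldl (fun dist k =>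
    dist.map (fun row => (PySem.List.pyRange 0 (n : Int)).map (fun j =>
      min (PySem.List.pyGetD row j 0) (PySem.List.pyGetD row k 0 + pvGet2 dist k j)))) times with hDb
  cases hfw : fwD times with
  | none =>
    obtain ⟨i, hi, hneg⟩ := hnone hfw
    have hany : ((PySem.List.pyRange 0 (n : Int)).any (fun i => decide (pvGet2 Db i i < 0))) = true := by
      rw [List.any_eq_true]
      refine ⟨(i : Int), PySem.List.mem_pyRange_one.mpr ⟨by omega, by exact_mod_cast hi⟩, ?_⟩
      rw [decide_eq_true_iff, hBagree i i hi hi]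
      exact hneg
    rw [hany]
    rfl
  | some st =>
    obtain ⟨hstsh, hstag, hnodet⟩ := hsome st hfw
    have hany : ((PySem.List.pyRange 0 (n : Int)).any (fun i => decide (pvGet2 Db i i < 0))) = false := by
      rw [List.any_eq_false]
      intro x hx
      obtain ⟨hx0, hx1⟩ := PySem.List.mem_pyRange_one.mp hx
      have hxn : x.toNat < n := by omega
      have hxc : x = ((x.toNat : Nat) : Int) := by omega
      rw [hxc, decide_eq_true_iff, hBagree x.toNat x.toNat hxn hxn]
      intro hlt
      exact hnodet ⟨x.toNat, hxn, hlt⟩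
    rw [hany]
    change (if st = [] then PySem.List.pyRange 0 ((n : Int) - 2) else _) = _
    simp only [Bool.false_eq_true, if_false]
    by_cases hn0 : n = 0
    · have htimes : st = [] := List.eq_nil_of_length_eq_zero (by rw [hstsh.1, hn0])
      rw [if_pos htimes, hn0]
      rw [PySem.List.pyRange_one_eq_nil (by omega), PySem.List.pyRange_neg_one_eq_nil (by omega)]
      rfl
    · have hstne : st ≠ [] := by
        intro h
        apply hn0
        rw [← hstsh.1, h]
        rfl
      rw [if_neg hstne]
      rw [foldl_firstSome, foldl_firstSome]
      have hlist : PySem.List.pyRange ((n : Int) - 2) 0 (-1) =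
          (PySem.List.pyRange 1 ((n : Int) - 2 + 1)).reverse := by
        rw [PySem.List.pyRange_neg_one_eq_reverse]
        norm_num
      rw [hlist]
      refine congrArg (fun o : Option (List Int) => o.getD []) ?_
      apply findSome?_congr_mem
      intro s hs
      obtain ⟨hs1, hs2⟩ := PySem.List.mem_pyRange_one.mp (List.mem_reverse.mp hs)
      beta_reduce
      rw [foldl_firstSome, searchB_eq]
      have hpool : PySem.List.pyRange 1 ((n : Int) - 1) = PySem.List.pyRange 1 ((n : Int) - 2 + 1) := by
        have h : ((n : Int) - 2 + 1) = (n : Int) - 1 := by ring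
        rw [h]
      rw [hpool]
      apply findSome?_congr_mem
      intro p hp
      have hplen : p.length = s.toNat := PySem.List.length_of_mem_permutations hp
      have hpne : p ≠ [] := by
        intro h
        rw [h] at hplen
        simp at hplen
        omega
      have hag : ∀ i j : Nat, i < n → j < n →
          pvGet2 st (i : Int) (j : Int) = pvGet2 Db (i : Int) (j : Int) := by
        intro i j hi hj
        rw [hstag i j hi hj, hBagree i j hi hj]
      have hmem : ∀ y ∈ p, 0 ≤ y ∧ y < (n : Int) := by
        intro y hy
        have := PySem.List.mem_pyRange_one.mp
          (PySem.List.mem_of_mem_of_mem_permutations hp hy)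
        omega
      have hcost : costF st ((n : Int) - 1) 0 p = costF Db ((n : Int) - 1) 0 p :=
        costF_congr st Db n ((n : Int) - 1) hag rfl (by omega) p 0 (le_refl 0)
          (by omega) hmem
      obtain ⟨x, xs, hxxs⟩ := List.exists_cons_of_ne_nil hpne
      subst hxxs
      rw [costA_eq st ((n : Int) - 1) x xs, hcost]
      rw [zero_add, List.nil_append]

-- ===== VERDICT (by name: the statement is the Claim_ definition above) =====
theorem solution_spec : Claim_equal_solution := by
  intro times times_limit _ hpre
  exact main_eq times times_limit hpre
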